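-- pv_equiv track=rewrite | github.com/rkarmuri/My_DSA_Practice_Problems | BinarySearch/rootsMath.py | nthRootBS
-- ===== SOURCE A (Python) =====
-- def nthRootBS(n,m):
--     low, high = 1, m
--     while low<=high:
--         mid = (low+high)//2
--         root = powerFunction2(mid,n,m)
--         # Check if the mid is equal to the target
--         if root==1:
--             return mid
--         # If the root is less than target, eliminate the left half
--         elif root==0:
--             low = mid + 1
--         # If the root is greater than target, eliminate the right half
--         else:
--             high = mid - 1
--
--     return -1 # If there is no root found
--
-- def powerFunction2(mid,n,m):
--     ans = 1
--     # Multiply the mid raised to the power n times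
--     for _ in range(1,n+1):
--         ans = ans * mid
--         # If the power result of mid exceeds the m, stop going beyond
--         if ans>m:
--             return 2
--     if ans==m:
--         return 1
--     return 0
-- ===== SOURCE B (Python) =====
-- def _powc(b, e, cap):
--     # min(b**e, cap) by repeated squaring, saturating at cap (b >= 1, cap >= 1, e >= 0)
--     if e == 0:
--         return 1
--     h = _powc(min(b * b, cap), e // 2, cap)
--     return min(h * b, cap) if e % 2 else h
--
-- def nthRootBS(n, m):
--     if n <= 0:
--         return 1 if m == 1 else -1
--     if m < 1:
--         return -1
--     lo, hi = 1, m
--     while lo < hi: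
--         mid = (lo + hi + 1) // 2
--         if _powc(mid, n, m + 1) <= m:
--             lo = mid
--         else:
--             hi = mid - 1
--     return lo if _powc(lo, n, m + 1) == m else -1
-- ===== Notes on version B (the rewrite author's own statement) =====
-- stated objective: faster
-- what changed: B binary-searches for the floor nth root (lo<hi loop, upper midpoint, no early return, single final equality check) using saturating fast exponentiation instead of A's three-way linear power loop inside an early-returning binary search.
import Mathlib
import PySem

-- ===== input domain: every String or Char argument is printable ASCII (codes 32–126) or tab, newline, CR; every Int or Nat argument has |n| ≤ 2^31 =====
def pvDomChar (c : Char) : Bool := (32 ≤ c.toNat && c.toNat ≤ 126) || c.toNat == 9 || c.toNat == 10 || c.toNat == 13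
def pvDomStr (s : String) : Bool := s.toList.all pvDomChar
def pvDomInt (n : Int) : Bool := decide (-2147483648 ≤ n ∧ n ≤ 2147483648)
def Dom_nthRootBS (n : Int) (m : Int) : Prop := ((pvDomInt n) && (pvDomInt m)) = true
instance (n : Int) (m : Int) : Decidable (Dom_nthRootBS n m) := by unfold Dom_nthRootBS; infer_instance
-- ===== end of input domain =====

-- B replaces A's early-returning binary search with a linear capped power loop by a
-- floor-nth-root binary search (lo < hi, upper midpoint, one final equality check) whose
-- power is computed by saturating repeated squaring; equivalence of return values is proved.
-- (Both while loops are ported with a Nat fuel that provably exceeds the iteration count.)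

-- ===== PORT A =====

-- A's inner for-loop of powerFunction2: k iterations remain, accumulator ans
def powerFunction2Go (mid m : Int) : Nat → Int → Int
  | 0, ans => if ans = m then 1 else 0
  | k + 1, ans =>
      let ans' := ans * mid
      if ans' > m then 2 else powerFunction2Go mid m k ans'

-- range(1, n+1) has n.toNat elements
def powerFunction2 (mid n m : Int) : Int := powerFunction2Go mid m n.toNat 1

-- A's while loop; the interval [low, high] shrinks each iteration, so fuel > high+1-low suffices
def nthRootBSLoop (n m : Int) : Nat → Int → Int → Int
  | 0, _, _ => -1
  | fuel + 1, low, high =>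
      if low ≤ high then
        let mid := PySem.Int.floordiv (low + high) 2
        let root := powerFunction2 mid n m
        if root = 1 then mid
        else if root = 0 then nthRootBSLoop n m fuel (mid + 1) high
        else nthRootBSLoop n m fuel low (mid - 1)
      else -1

def nthRootBS (n : Int) (m : Int) : Int := nthRootBSLoop n m (m.toNat + 1) 1 m

-- ===== PORT B =====

-- Source B's _powc: min(b**e, cap) by repeated squaring, saturating at cap;
-- structural on a fuel that bounds the exponent (e ≤ fuel suffices)
def powcGo (cap : Int) : Nat → Int → Nat → Int
  | _, _, 0 => 1
  | 0, _, _ => 1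
  | f + 1, b, e + 1 =>
      let h := powcGo cap f (min (b * b) cap) ((e + 1) / 2)
      if (e + 1) % 2 = 0 then h else min (h * b) cap

def powc (b e cap : Int) : Int := powcGo cap e.toNat b e.toNat

-- Source B's while loop: binary search for the largest lo with lo**n <= m
def altLoop (n m : Int) : Nat → Int → Int → Int
  | 0, lo, _ => lo
  | fuel + 1, lo, hi =>
      if lo < hi then
        let mid := PySem.Int.floordiv (lo + hi + 1) 2
        if powc mid n (m + 1) ≤ m then altLoop n m fuel mid hi
        else altLoop n m fuel lo (mid - 1)
      else lo

def nthRootBS_alt (n : Int) (m : Int) : Int :=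
  if n ≤ 0 then (if m = 1 then 1 else -1)
  else if m < 1 then -1
  else
    let res := altLoop n m (m.toNat + 1) 1 m
    if powc res n (m + 1) = m then res else -1

-- ===== PRECONDITION & SPEC =====
def Spec_nthRootBS (n : Int) (m : Int) (out : Int) : Prop := out = nthRootBS_alt n m
instance (n : Int) (m : Int) (out : Int) : Decidable (Spec_nthRootBS n m out) := by unfold Spec_nthRootBS; infer_instance

-- ===== CLAIM (what is proved, stated in full; the proofs are below) =====
def Claim_equal_nthRootBS : Prop := ∀ (n : Int) (m : Int), Dom_nthRootBS n m → Spec_nthRootBS n m (nthRootBS n m)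

-- ===== LEMMAS AND PROOFS =====

theorem powerFunction2Go_eq (mid m : Int) (k : Nat) :
    ∀ ans : Int, 1 ≤ mid → 1 ≤ ans → ans ≤ m →
    powerFunction2Go mid m k ans =
      if m < ans * mid ^ k then 2 else if ans * mid ^ k = m then 1 else 0 := by
  induction k with
  | zero =>
      intro ans _ _ h3
      simp only [powerFunction2Go, pow_zero, mul_one]
      split_ifs with h1 h2 h3' <;> omega
  | succ k ih =>
      intro ans hmid hans hansm
      simp only [powerFunction2Go]
      have hpk : (1 : Int) ≤ mid ^ k := one_le_pow₀ hmid
      have heq : ans * mid ^ (k + 1) = (ans * mid) * mid ^ k := by ring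
      by_cases hgt : ans * mid > m
      · have h2 : m < ans * mid ^ (k + 1) := by
          rw [heq]
          have : ans * mid ≤ (ans * mid) * mid ^ k :=
            le_mul_of_one_le_right (by nlinarith) hpk
          omega
        simp [hgt, h2]
      · have hle : ans * mid ≤ m := by omega
        have hans' : (1 : Int) ≤ ans * mid := by nlinarith
        rw [if_neg hgt, ih (ans * mid) hmid hans' hle, heq]

theorem powerFunction2_eq (mid n m : Int) (h1 : 1 ≤ mid) (h2 : mid ≤ m) :
    powerFunction2 mid n m =
      if m < mid ^ n.toNat then 2 else if mid ^ n.toNat = m then 1 else 0 := by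
  have := powerFunction2Go_eq mid m n.toNat 1 h1 le_rfl (by omega)
  simpa [powerFunction2] using this

theorem loopA_root (n m : Int) (r : Int)
    (hr1 : 1 ≤ r) (hrm : r ≤ m) (hroot : r ^ n.toNat = m)
    (uniq : ∀ s : Int, 1 ≤ s → s ≤ m → s ^ n.toNat = m → s = r) :
    ∀ fuel : Nat, ∀ low high : Int, (high + 1 - low).toNat < fuel →
      1 ≤ low → high ≤ m → low ≤ r → r ≤ high →
      nthRootBSLoop n m fuel low high = r := by
  intro fuel
  induction fuel with
  | zero => intro low high hf; omega
  | succ fuel ih =>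
      intro low high hf hlo hhi hlr hrh
      have hle : low ≤ high := by omega
      have hb := PySem.Int.floordiv_two_mid_bounds hle
      have hpe := powerFunction2_eq (PySem.Int.floordiv (low + high) 2) n m (by omega) (by omega)
      rcases lt_trichotomy ((PySem.Int.floordiv (low + high) 2) ^ n.toNat) m with hc | hc | hc
      · -- mid ^ n.toNat < m, so r > mid by monotonicity
        have hpf : powerFunction2 (PySem.Int.floordiv (low + high) 2) n m = 0 := by
          rw [hpe, if_neg (by omega), if_neg (by omega)]
        have hmidr : PySem.Int.floordiv (low + high) 2 < r := by
          by_contra hcon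
          have : r ^ n.toNat ≤ (PySem.Int.floordiv (low + high) 2) ^ n.toNat :=
            pow_le_pow_left₀ (by omega) (by omega) _
          omega
        simp only [nthRootBSLoop, if_pos hle, hpf]
        try rw [if_pos trivial]
        exact ih _ _ (by omega) (by omega) hhi (by omega) hrh
      · have hpf : powerFunction2 (PySem.Int.floordiv (low + high) 2) n m = 1 := by
          rw [hpe, if_neg (by omega), if_pos hc]
        simp only [nthRootBSLoop, if_pos hle, hpf]
        try rw [if_pos trivial]
        exact uniq _ (by omega) (by omega) hc
      · -- m < mid ^ n.toNat, so r < mid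
        have hpf : powerFunction2 (PySem.Int.floordiv (low + high) 2) n m = 2 := by
          rw [hpe, if_pos hc]
        have hrmid : r < PySem.Int.floordiv (low + high) 2 := by
          by_contra hcon
          have : (PySem.Int.floordiv (low + high) 2) ^ n.toNat ≤ r ^ n.toNat :=
            pow_le_pow_left₀ (by omega) (by omega) _
          omega
        simp only [nthRootBSLoop, if_pos hle, hpf]
        try rw [if_pos trivial]
        exact ih _ _ (by omega) hlo (by omega) hlr (by omega)

theorem loopA_noroot (n m : Int)
    (hnone : ∀ s : Int, 1 ≤ s → s ≤ m → s ^ n.toNat ≠ m) :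
    ∀ fuel : Nat, ∀ low high : Int, (high + 1 - low).toNat < fuel →
      1 ≤ low → high ≤ m →
      nthRootBSLoop n m fuel low high = -1 := by
  intro fuel
  induction fuel with
  | zero => intro low high hf _ _; omega
  | succ fuel ih =>
      intro low high hf hlo hhi
      by_cases hle : low ≤ high
      · have hb := PySem.Int.floordiv_two_mid_bounds hle
        have hpe := powerFunction2_eq (PySem.Int.floordiv (low + high) 2) n m (by omega) (by omega)
        rcases lt_trichotomy ((PySem.Int.floordiv (low + high) 2) ^ n.toNat) m with hc | hc | hc
        · have hpf : powerFunction2 (PySem.Int.floordiv (low + high) 2) n m = 0 := by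
            rw [hpe, if_neg (by omega), if_neg (by omega)]
          simp only [nthRootBSLoop, if_pos hle, hpf]
          try rw [if_pos trivial]
          exact ih _ _ (by omega) (by omega) hhi
        · exact absurd hc (hnone _ (by omega) (by omega))
        · have hpf : powerFunction2 (PySem.Int.floordiv (low + high) 2) n m = 2 := by
            rw [hpe, if_pos hc]
          simp only [nthRootBSLoop, if_pos hle, hpf]
          try rw [if_pos trivial]
          exact ih _ _ (by omega) hlo (by omega)
      · simp [nthRootBSLoop, hle]

theorem cap_mul (x y cap : Int) (hy : 1 ≤ y) (hc : 1 ≤ cap) :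
    min (min x cap * y) cap = min (x * y) cap := by
  rcases le_or_gt x cap with h | h
  · rw [min_eq_left h]
  · rw [min_eq_right (le_of_lt h)]
    have h1 : cap ≤ cap * y := le_mul_of_one_le_right (by omega) hy
    have h2 : cap ≤ x * y := by nlinarith
    omega

theorem cap_pow (x cap : Int) (hx : 1 ≤ x) (hc : 1 ≤ cap) (k : Nat) :
    min (min x cap ^ k) cap = min (x ^ k) cap := by
  rcases le_or_gt x cap with h | h
  · rw [min_eq_left h]
  · rw [min_eq_right (le_of_lt h)]
    rcases Nat.eq_zero_or_pos k with hk | hk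
    · simp [hk]
    · have h1 : cap ≤ cap ^ k := le_self_pow₀ hc (by omega)
      have h2 : cap ≤ x ^ k := by
        have : x ≤ x ^ k := le_self_pow₀ hx (by omega)
        omega
      omega

theorem powcGo_eq (cap : Int) (hc : 1 ≤ cap) :
    ∀ fuel : Nat, ∀ e : Nat, e ≤ fuel → ∀ b : Int, 1 ≤ b →
      powcGo cap fuel b e = min (b ^ e) cap := by
  intro fuel
  induction fuel with
  | zero =>
      intro e he b hb
      have : e = 0 := by omega
      subst this
      simp [powcGo, hc]
  | succ fuel ih =>
      intro e he b hb
      match e with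
      | 0 => simp [powcGo, hc]
      | e + 1 =>
          simp only [powcGo]
          have hbb : (1 : Int) ≤ min (b * b) cap := by
            have : (1 : Int) ≤ b * b := by nlinarith
            omega
          rw [ih ((e + 1) / 2) (by omega) _ hbb,
            cap_pow (b * b) cap (by nlinarith) hc]
          have hsq : (b * b) ^ ((e + 1) / 2) = b ^ (2 * ((e + 1) / 2)) := by
            rw [two_mul, pow_add, mul_pow]
          rw [hsq]
          rcases Nat.even_or_odd (e + 1) with ⟨t, ht⟩ | ⟨t, ht⟩
          · have h2 : 2 * ((e + 1) / 2) = e + 1 := by omega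
            have hm : (e + 1) % 2 = 0 := by omega
            rw [h2, if_pos hm]
          · have h2 : 2 * ((e + 1) / 2) = e := by omega
            have hm : ¬ (e + 1) % 2 = 0 := by omega
            rw [h2, if_neg hm, cap_mul _ b cap hb hc, ← pow_succ]

theorem powc_eq' (b e cap : Int) (hb : 1 ≤ b) (hc : 1 ≤ cap) :
    powc b e cap = min (b ^ e.toNat) cap := by
  unfold powc
  exact powcGo_eq cap hc e.toNat e.toNat le_rfl b hb

theorem altLoop_spec (n m : Int) (hn : 0 ≤ n) (hm : 1 ≤ m) :
    ∀ fuel : Nat, ∀ lo hi : Int, (hi - lo).toNat < fuel →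
      1 ≤ lo → lo ≤ hi → hi ≤ m → lo ^ n.toNat ≤ m →
      (∀ r : Int, hi < r → r ≤ m → m < r ^ n.toNat) →
      1 ≤ altLoop n m fuel lo hi ∧ altLoop n m fuel lo hi ≤ m ∧
      (altLoop n m fuel lo hi) ^ n.toNat ≤ m ∧
      (∀ r : Int, altLoop n m fuel lo hi < r → r ≤ m → m < r ^ n.toNat) := by
  intro fuel
  induction fuel with
  | zero => intro lo hi hf; omega
  | succ fuel ih =>
      intro lo hi hf h1 h2 h3 h4 h5
      by_cases hlt : lo < hi
      · have hb := PySem.Int.floordiv_two_mid_bounds (lo := lo + 1) (hi := hi) (by omega)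
        have he : lo + 1 + hi = lo + hi + 1 := by ring
        rw [he] at hb
        simp only [altLoop, if_pos hlt]
        rw [powc_eq' _ n (m + 1) (by omega) (by omega)]
        split_ifs with hcond
        · exact ih _ _ (by omega) (by omega) (by omega) h3 (by omega) h5
        · have hmid : m < (PySem.Int.floordiv (lo + hi + 1) 2) ^ n.toNat := by omega
          have hlomid : lo < PySem.Int.floordiv (lo + hi + 1) 2 := by
            by_contra hcon
            have : (PySem.Int.floordiv (lo + hi + 1) 2) ^ n.toNat ≤ lo ^ n.toNat :=
              pow_le_pow_left₀ (by omega) (by omega) _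
            omega
          refine ih _ _ (by omega) h1 (by omega) (by omega) h4 ?_
          intro r hr hrm
          rcases le_or_gt r hi with h | h
          · have : (PySem.Int.floordiv (lo + hi + 1) 2) ^ n.toNat ≤ r ^ n.toNat :=
              pow_le_pow_left₀ (by omega) (by omega) _
            omega
          · exact h5 r h hrm
      · have heq : lo = hi := by omega
        simp only [altLoop, if_neg hlt]
        exact ⟨h1, by omega, h4, by rw [heq]; exact h5⟩

-- ===== VERDICT (by name: the statement is the Claim_ definition above) =====
theorem nthRootBS_spec : Claim_equal_nthRootBS := by
  unfold Claim_equal_nthRootBS Spec_nthRootBS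
  intro n m _
  show nthRootBSLoop n m (m.toNat + 1) 1 m = nthRootBS_alt n m
  rcases lt_or_ge m 1 with hm | hm
  · -- m < 1: both -1
    have h0 : m.toNat = 0 := by omega
    rw [h0]
    simp only [nthRootBSLoop, if_neg (by omega : ¬ (1 : Int) ≤ m)]
    unfold nthRootBS_alt
    split_ifs with h1 h2 h3 <;> omega
  · rcases le_or_gt n 0 with hn | hn
    · -- n ≤ 0: power is always 1
      have hnn : n.toNat = 0 := by omega
      rcases eq_or_lt_of_le hm with hm1 | hm2
      · have hm1 : m = 1 := hm1.symm
        subst hm1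
        rw [loopA_root n 1 1 le_rfl le_rfl (by simp [hnn])
          (fun s hs1 hs2 _ => by omega) _ 1 1 (by omega) le_rfl le_rfl le_rfl le_rfl]
        unfold nthRootBS_alt
        simp [hn]
      · rw [loopA_noroot n m
          (fun s hs1 hs2 => by rw [hnn]; simpa using (by omega : ¬ (1:Int) = m))
          _ 1 m (by omega) le_rfl le_rfl]
        unfold nthRootBS_alt
        simp only [if_pos hn]
        rw [if_neg (by omega : ¬ m = 1)]
    · -- n ≥ 1, m ≥ 1
      have hnn : n.toNat ≠ 0 := by omega
      obtain ⟨hres1, hresm, hresle, hresgt⟩ :=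
        altLoop_spec n m (by omega) hm (m.toNat + 1) 1 m (by omega) le_rfl hm le_rfl
          (by simpa using hm) (fun r hr hrm => absurd hr (by omega))
      set res := altLoop n m (m.toNat + 1) 1 m with hres
      have hBeq : nthRootBS_alt n m =
          if powc res n (m + 1) = m then res else -1 := by
        unfold nthRootBS_alt
        rw [if_neg (by omega : ¬ n ≤ 0), if_neg (by omega : ¬ m < 1)]
      rw [hBeq, powc_eq' res n (m + 1) hres1 (by omega)]
      have hmin : min (res ^ n.toNat) (m + 1) = m ↔ res ^ n.toNat = m := by omega
      rcases eq_or_ne (res ^ n.toNat) m with hroot | hroot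
      · rw [if_pos (hmin.mpr hroot)]
        refine loopA_root n m res hres1 hresm hroot ?_ _ 1 m (by omega) le_rfl le_rfl hres1 hresm
        intro s hs1 hsm hs
        rcases lt_trichotomy s res with h | h | h
        · have : s ^ n.toNat < res ^ n.toNat :=
            pow_lt_pow_left₀ h (by omega) hnn
          omega
        · exact h
        · have := hresgt s h hsm
          omega
      · rw [if_neg (fun hc => hroot (hmin.mp hc))]
        refine loopA_noroot n m ?_ _ 1 m (by omega) le_rfl le_rfl
        intro s hs1 hsm hs
        rcases le_or_gt s res with h | h
        · have : s ^ n.toNat ≤ res ^ n.toNat :=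
            pow_le_pow_left₀ (by omega) h _
          omega
        · have := hresgt s h hsm
          omega
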